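-- pv_equiv track=rewrite | github.com/sshen070/File_Markdown_Formatter | src/markdown_formatter_sshen070/file_formatting_algorithm.py | header_end_tracker
-- ===== SOURCE A (Python) =====
-- def header_end_tracker(word_list: list[str]) -> int:
--
--     # If there are bullet points in the word_list --> do not make a header
--     if (bullet_tracker(word_list) != len(word_list)):
--         return 0
--
--     for i in range(len(word_list) - 2):
--
--         # If first word is upper case & the second is lower --> issue with formating
--         if (not word_list[i].islower() and not word_list[i + 1].islower()
--                 and word_list[i + 2].islower()):
--
--             # If the third word is a valid header word (ex. "to") --> continue
--             if (word_comparator(word_list[i + 2])):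
--                 continue
--             return i + 1
--
--     return len(word_list)
--
-- def word_comparator(lower_case_word: str) -> bool:
--     valid_in_header: list[str] = [
--         "a", "an", "and", "as", "at", "but", "by", "en", "for", "if", "in",
--         "of", "on", "or", "the", "to", "v", "v.", "vs", "vs."
--     ]
--
--     for word in valid_in_header:
--         if (lower_case_word == word):
--             return True
--     return False
--
-- def bullet_tracker(word_list: list[str]) -> int:
--     for i in range(len(word_list) - 1):
--
--         # If '*' appears --> we have a list under a header list
--         if word_list[i].startswith("*"):
--             if (i == 0):
--                 return bullet_tracker(word_list[1:]) + 1
--             return i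
--
--     return len(word_list)
-- ===== SOURCE B (Python) =====
-- VALID_IN_HEADER = frozenset({
--     "a", "an", "and", "as", "at", "but", "by", "en", "for", "if", "in",
--     "of", "on", "or", "the", "to", "v", "v.", "vs", "vs."
-- })
--
--
-- def _first_bad_triple(words):
--     # First i such that words[i], words[i+1] are not lowercase, words[i+2] is
--     # lowercase and not a valid header word; returns i + 1, else None.
--     i = 0
--     for a, b, c in zip(words, words[1:], words[2:]):
--         if (not a.islower() and not b.islower() and c.islower()
--                 and c not in VALID_IN_HEADER):
--             return i + 1
--         i += 1
--     return None
--
--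
-- def header_end_tracker(word_list: list[str]) -> int:
--     # A bullet word anywhere after the leading run of bullets (last word
--     # excepted) means "list under a header": no header.
--     rest = word_list
--     while rest and rest[0].startswith("*"):
--         rest = rest[1:]
--     if any(w.startswith("*") for w in rest[:-1]):
--         return 0
--     t = _first_bad_triple(word_list)
--     return len(word_list) if t is None else t
-- ===== Notes on version B (the rewrite author's own statement) =====
-- stated objective: simpler
-- what changed: The recursive bullet_tracker (re-slicing the list and comparing its result against len) is replaced by a direct iterative check - strip the leading run of '*' words, then test whether any '*' word remains before the last position - and the index-based main scan becomes a single pass over zipped consecutive triples with the valid-header words held in a frozenset.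
import Mathlib
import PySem

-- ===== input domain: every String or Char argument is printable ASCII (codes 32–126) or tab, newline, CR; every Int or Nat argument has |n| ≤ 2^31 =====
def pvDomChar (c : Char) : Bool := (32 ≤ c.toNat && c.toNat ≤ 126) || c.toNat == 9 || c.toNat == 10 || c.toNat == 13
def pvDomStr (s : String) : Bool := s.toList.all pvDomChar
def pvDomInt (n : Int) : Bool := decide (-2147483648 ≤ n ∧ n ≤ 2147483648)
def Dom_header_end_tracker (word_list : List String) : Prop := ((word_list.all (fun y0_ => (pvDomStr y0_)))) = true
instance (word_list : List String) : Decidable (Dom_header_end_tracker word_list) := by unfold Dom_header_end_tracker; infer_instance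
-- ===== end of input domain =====

-- B replaces A's recursive, list-re-slicing bullet_tracker by a direct iterative bullet check
-- (strip the leading '*' run, then look for a remaining '*' before the last word) and scans
-- consecutive triples structurally instead of by index; objective: simpler.

-- str.islower(), ported by hand (PySem has only the per-character tests): on the ASCII domain
-- the cased characters are exactly the letters, so s.islower() is "no uppercase letter and at
-- least one lowercase letter" (exact on the stated printable-ASCII domain).
def pvStrIslower (s : String) : Bool :=
  s.toList.all (fun c => !PySem.Chars.isupper c) && s.toList.any (fun c => PySem.Chars.islower c)

-- ===== PORT A =====
def pvValidInHeader : List String :=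
  ["a", "an", "and", "as", "at", "but", "by", "en", "for", "if", "in",
   "of", "on", "or", "the", "to", "v", "v.", "vs", "vs."]

def pvWcLoop : List String → String → Bool
  | [], _ => false
  | x :: xs, w => if w == x then true else pvWcLoop xs w

def word_comparator (lower_case_word : String) : Bool :=
  pvWcLoop pvValidInHeader lower_case_word

-- the early-return for-loop of bullet_tracker: first index i in the list with word_list[i].startswith('*')
def pvBtFind (word_list : List String) : List Int → Option Int
  | [] => none
  | i :: rest =>
      if PySem.Str.startswith (PySem.List.pyGetD word_list i "") "*" then some i
      else pvBtFind word_list rest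

theorem pvBtFind_nil (word_list : List String) : pvBtFind word_list [] = none := rfl

def bullet_tracker (word_list : List String) : Int :=
  match h : pvBtFind word_list (PySem.List.pyRange 0 ((word_list.length : Int) - 1) 1) with
  | some i =>
      if i = 0 then bullet_tracker (PySem.List.slice word_list (some 1) none) + 1
      else i
  | none => (word_list.length : Int)
termination_by word_list.length
decreasing_by
  simp [PySem.List.slice_from]
  cases word_list with
  | nil =>
      exfalso
      rw [PySem.List.pyRange_one_eq_nil (by simp)] at h
      rw [pvBtFind_nil] at h
      simp at h
  | cons w ws => simp

-- the main for-loop of header_end_tracker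
def pvHetLoop (word_list : List String) : List Int → Int
  | [] => (word_list.length : Int)
  | i :: rest =>
      if !pvStrIslower (PySem.List.pyGetD word_list i "")
          && !pvStrIslower (PySem.List.pyGetD word_list (i + 1) "")
          && pvStrIslower (PySem.List.pyGetD word_list (i + 2) "") then
        if word_comparator (PySem.List.pyGetD word_list (i + 2) "") then pvHetLoop word_list rest
        else i + 1
      else pvHetLoop word_list rest

def header_end_tracker (word_list : List String) : Int :=
  if bullet_tracker word_list ≠ (word_list.length : Int) then 0
  else pvHetLoop word_list (PySem.List.pyRange 0 ((word_list.length : Int) - 2) 1)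

-- ===== PORT B =====
def pvValidSet : PySem.Set String := PySem.Set.ofList
  ["a", "an", "and", "as", "at", "but", "by", "en", "for", "if", "in",
   "of", "on", "or", "the", "to", "v", "v.", "vs", "vs."]

def pvStar (w : String) : Bool := PySem.Str.startswith w "*"

-- _first_bad_triple: one pass over zipped consecutive triples, counter i
def pvFirstBadTriple : List String → Int → Option Int
  | a :: b :: c :: rest, i =>
      if !pvStrIslower a && !pvStrIslower b && pvStrIslower c && !pvValidSet.contains c then
        some (i + 1)
      else pvFirstBadTriple (b :: c :: rest) (i + 1)
  | _, _ => none

def header_end_tracker_alt (word_list : List String) : Int :=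
  let rest := word_list.dropWhile pvStar
  if rest.dropLast.any pvStar then 0
  else
    match pvFirstBadTriple word_list 0 with
    | some t => t
    | none => (word_list.length : Int)

-- ===== PRECONDITION & SPEC =====
def Spec_header_end_tracker (word_list : List String) (out : Int) : Prop := out = header_end_tracker_alt word_list
instance (word_list : List String) (out : Int) : Decidable (Spec_header_end_tracker word_list out) := by unfold Spec_header_end_tracker; infer_instance

-- ===== CLAIM (what is proved, stated in full; the proofs are below) =====
def Claim_equal_header_end_tracker : Prop := ∀ (word_list : List String), Dom_header_end_tracker word_list → Spec_header_end_tracker word_list (header_end_tracker word_list)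

-- ===== LEMMAS AND PROOFS =====

theorem pvStar_def (w : String) : PySem.Str.startswith w "*" = pvStar w := rfl

theorem pvWcLoop_eq_contains (l : List String) (w : String) : pvWcLoop l w = l.contains w := by
  induction l with
  | nil => rfl
  | cons x xs ih =>
      simp only [pvWcLoop, List.contains_cons]
      by_cases h : (w == x) = true
      · simp [h]
      · simp [h, ih]

theorem word_comparator_eq (w : String) : word_comparator w = pvValidSet.contains w := by
  have h : pvValidSet = pvValidInHeader := by decide
  rw [h, word_comparator, pvWcLoop_eq_contains]
  rfl

theorem pvBtFind_eq_none_iff (word_list : List String) (idxs : List Int) :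
    pvBtFind word_list idxs = none ↔
      ∀ i ∈ idxs, pvStar (PySem.List.pyGetD word_list i "") = false := by
  induction idxs with
  | nil => simp [pvBtFind]
  | cons i rest ih =>
      simp only [pvBtFind, pvStar_def]
      by_cases h : pvStar (PySem.List.pyGetD word_list i "") = true
      · simp [h]
      · rw [if_neg (by simp [h]), ih, List.forall_mem_cons]
        simp [h]

theorem pvBtFind_eq_some (word_list : List String) (idxs : List Int) (i : Int)
    (h : pvBtFind word_list idxs = some i) :
    i ∈ idxs ∧ pvStar (PySem.List.pyGetD word_list i "") = true := by
  induction idxs with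
  | nil => simp [pvBtFind] at h
  | cons j rest ih =>
      simp only [pvBtFind, pvStar_def] at h
      by_cases hj : pvStar (PySem.List.pyGetD word_list j "") = true
      · rw [if_pos hj] at h
        cases h
        exact ⟨List.mem_cons_self, hj⟩
      · rw [if_neg (by simp [hj])] at h
        obtain ⟨hm, hs⟩ := ih h
        exact ⟨List.mem_cons_of_mem _ hm, hs⟩

-- any-over-dropLast as a statement about indices below length - 1
theorem pvAnyDropLast_iff (L : List String) :
    (L.dropLast.any pvStar = false) ↔ ∀ j (h : j + 1 < L.length), pvStar (L[j]'(by omega)) = false := by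
  rw [List.any_eq_false]
  constructor
  · intro h j hj
    have hj' : j < L.dropLast.length := by simp [List.length_dropLast]; omega
    have := h (L.dropLast[j]'hj') (List.getElem_mem hj')
    simpa [List.getElem_dropLast] using this
  · intro h x hx
    obtain ⟨j, hj, rfl⟩ := List.mem_iff_getElem.mp hx
    have hj2 : j + 1 < L.length := by simp [List.length_dropLast] at hj; omega
    have := h j hj2
    simpa [List.getElem_dropLast] using this

-- the bullet condition: A's recursive bullet_tracker returns len(word_list) exactly when
-- B's iterative check finds no '*' word after the leading '*' run (last word excepted)
theorem pvBulletIff (L : List String) :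
    (bullet_tracker L = (L.length : Int)) ↔ ((L.dropWhile pvStar).dropLast.any pvStar = false) := by
  induction L with
  | nil =>
      have h0 : bullet_tracker [] = 0 := by
        rw [bullet_tracker.eq_def]
        split
        · rename_i i h
          rw [PySem.List.pyRange_one_eq_nil (by norm_num), pvBtFind_nil] at h
          simp at h
        · simp
      simp [h0]
  | cons w ws ih =>
      by_cases hw : pvStar w = true
      · cases ws with
        | nil =>
            have h1 : bullet_tracker [w] = 1 := by
              rw [bullet_tracker.eq_def]
              split
              · rename_i i h
                rw [PySem.List.pyRange_one_eq_nil (by simp), pvBtFind_nil] at h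
                simp at h
              · simp
            simp [h1, hw]
        | cons x xs =>
            have hbf : pvBtFind (w :: x :: xs)
                (PySem.List.pyRange 0 (((w :: x :: xs).length : Int) - 1) 1) = some 0 := by
              rw [PySem.List.pyRange_one_cons
                (by simp only [List.length_cons]; push_cast; omega)]
              simp only [pvBtFind, pvStar_def]
              rw [if_pos (by simpa [PySem.List.pyGetD_zero_cons] using hw)]
            have h2 : bullet_tracker (w :: x :: xs) = bullet_tracker (x :: xs) + 1 := by
              rw [bullet_tracker.eq_def]
              split
              · rename_i i h
                rw [hbf] at h
                cases h
                simp [PySem.List.slice_from]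
              · rename_i h
                rw [hbf] at h
                simp at h
            have hdw : (w :: x :: xs).dropWhile pvStar = (x :: xs).dropWhile pvStar := by
              simp [List.dropWhile_cons, hw]
            rw [h2, hdw, ← ih,
              show (((w :: x :: xs).length : Int)) = (((x :: xs).length : Int)) + 1 by
                simp only [List.length_cons]; push_cast; ring]
            omega
      · have hdw : (w :: ws).dropWhile pvStar = w :: ws :=
          List.dropWhile_cons_of_neg (by simpa using hw)
        rw [hdw]
        cases hbf : pvBtFind (w :: ws)
            (PySem.List.pyRange 0 (((w :: ws).length : Int) - 1) 1) with
        | none =>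
            have hbt : bullet_tracker (w :: ws) = ((w :: ws).length : Int) := by
              rw [bullet_tracker.eq_def]
              split
              · rename_i i h
                rw [hbf] at h
                simp at h
              · rfl
            rw [hbt]
            simp only [true_iff]
            rw [pvAnyDropLast_iff]
            intro j hj
            have hmem : ((j : Int)) ∈ PySem.List.pyRange 0 (((w :: ws).length : Int) - 1) 1 := by
              rw [PySem.List.mem_pyRange_one]
              constructor <;> [positivity; (push_cast; omega)]
            have hv := (pvBtFind_eq_none_iff _ _).mp hbf _ hmem
            rw [PySem.List.pyGetD_natCast, List.getD_eq_getElem _ _ (by omega)] at hv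
            exact hv
        | some i =>
            obtain ⟨hmem, hstar⟩ := pvBtFind_eq_some _ _ _ hbf
            rw [PySem.List.mem_pyRange_one] at hmem
            have hi0 : i ≠ 0 := by
              intro h0
              subst h0
              rw [PySem.List.pyGetD_zero_cons] at hstar
              exact hw hstar
            have hbt : bullet_tracker (w :: ws) = i := by
              rw [bullet_tracker.eq_def]
              split
              · rename_i j h
                rw [hbf] at h
                cases h
                rw [if_neg hi0]
              · rename_i h
                rw [hbf] at h
                simp at h
            rw [hbt]
            constructor
            · intro h
              exfalso
              rw [h] at hmem
              omega
            · intro h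
              exfalso
              rw [pvAnyDropLast_iff] at h
              have hj : i.toNat + 1 < (w :: ws).length := by omega
              have hfalse := h i.toNat hj
              rw [show i = ((i.toNat : Nat) : Int) by omega, PySem.List.pyGetD_natCast,
                List.getD_eq_getElem _ _ (by omega)] at hstar
              rw [hfalse] at hstar
              exact Bool.noConfusion hstar

-- the main scan: A's index loop from i equals B's structural triple scan on drop i
theorem pvScanEq (k : Nat) : ∀ (L : List String) (i : Nat), L.length - i ≤ k →
    pvHetLoop L (PySem.List.pyRange (i : Int) ((L.length : Int) - 2) 1) =
      (match pvFirstBadTriple (L.drop i) (i : Int) with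
        | some t => t
        | none => (L.length : Int)) := by
  induction k with
  | zero =>
      intro L i h
      rw [List.drop_eq_nil_of_le (by omega),
        PySem.List.pyRange_one_eq_nil (by omega)]
      simp [pvHetLoop, pvFirstBadTriple]
  | succ k ihk =>
      intro L i h
      by_cases h3 : i + 3 ≤ L.length
      · have e2 : L.drop (i + 1) = L[i + 1]'(by omega) :: L.drop (i + 2) :=
          List.drop_eq_getElem_cons (by omega)
        have e3 : L.drop (i + 2) = L[i + 2]'(by omega) :: L.drop (i + 3) :=
          List.drop_eq_getElem_cons (by omega)
        have e1 : L.drop i = L[i]'(by omega) :: L[i + 1]'(by omega) :: L[i + 2]'(by omega) :: L.drop (i + 3) := by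
          rw [List.drop_eq_getElem_cons (by omega), e2, e3]
        have g0 : PySem.List.pyGetD L ((i : Int)) "" = L[i]'(by omega) := by
          rw [PySem.List.pyGetD_natCast, List.getD_eq_getElem _ _ (by omega)]
        have g1 : PySem.List.pyGetD L ((i : Int) + 1) "" = L[i + 1]'(by omega) := by
          rw [show ((i : Int) + 1) = (((i + 1 : Nat)) : Int) by push_cast; ring,
            PySem.List.pyGetD_natCast, List.getD_eq_getElem _ _ (by omega)]
        have g2 : PySem.List.pyGetD L ((i : Int) + 2) "" = L[i + 2]'(by omega) := by
          rw [show ((i : Int) + 2) = (((i + 2 : Nat)) : Int) by push_cast; ring,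
            PySem.List.pyGetD_natCast, List.getD_eq_getElem _ _ (by omega)]
        have hrec : pvHetLoop L (PySem.List.pyRange ((i : Int) + 1) ((L.length : Int) - 2) 1) =
            (match pvFirstBadTriple (L[i + 1]'(by omega) :: L[i + 2]'(by omega) :: L.drop (i + 3)) ((i : Int) + 1) with
              | some t => t
              | none => (L.length : Int)) := by
          rw [show ((i : Int) + 1) = (((i + 1 : Nat)) : Int) by push_cast; ring, ← e3, ← e2]
          exact ihk L (i + 1) (by omega)
        rw [PySem.List.pyRange_one_cons (by omega), e1]
        simp only [pvHetLoop, pvFirstBadTriple, g0, g1, g2, word_comparator_eq]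
        by_cases h1 : (!pvStrIslower (L[i]'(by omega)) && !pvStrIslower (L[i + 1]'(by omega))
            && pvStrIslower (L[i + 2]'(by omega))) = true
        · by_cases h2 : pvValidSet.contains (L[i + 2]'(by omega)) = true
          · rw [if_pos h1, if_pos h2, if_neg (by simp [h1]; simpa using h2), hrec]
          · rw [if_pos h1, if_neg h2, if_pos (by simp [h1]; simpa using h2)]
        · have h1' : (!pvStrIslower (L[i]'(by omega)) && !pvStrIslower (L[i + 1]'(by omega))
              && pvStrIslower (L[i + 2]'(by omega))) = false := by
            simpa using h1
          rw [if_neg h1, if_neg (by simp [h1']), hrec]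
      · have hnone : pvFirstBadTriple (L.drop i) ((i : Int)) = none := by
          have hlen : (L.drop i).length ≤ 2 := by
            rw [List.length_drop]
            omega
          cases hd : L.drop i with
          | nil => rfl
          | cons a t =>
              cases t with
              | nil => rfl
              | cons b t2 =>
                  cases t2 with
                  | nil => rfl
                  | cons c t3 =>
                      exfalso
                      rw [hd] at hlen
                      simp at hlen
        rw [hnone, PySem.List.pyRange_one_eq_nil (by omega)]
        rfl

-- ===== VERDICT (by name: the statement is the Claim_ definition above) =====
theorem header_end_tracker_spec : Claim_equal_header_end_tracker := by
  intro L _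
  unfold Spec_header_end_tracker header_end_tracker header_end_tracker_alt
  by_cases hb : (L.dropWhile pvStar).dropLast.any pvStar
  · have : bullet_tracker L ≠ (L.length : Int) := by
      intro h; rw [(pvBulletIff L).mp h] at hb; exact Bool.noConfusion hb
    simp [this, hb]
  · have hb' : (L.dropWhile pvStar).dropLast.any pvStar = false := by simpa using hb
    have : bullet_tracker L = (L.length : Int) := (pvBulletIff L).mpr hb'
    simp only [this, ne_eq, not_true_eq_false, if_false, hb', Bool.false_eq_true]
    have := pvScanEq L.length L 0 (by omega)
    simpa using this
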